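-- pv_equiv track=rewrite | github.com/bar-ang/ProjectEulerSolutions | oldfiles/pe679.py | make_states
-- ===== SOURCE A (Python) =====
-- def make_states(words):
--     states = [""]
--     for word in words:
--         for i in range(1, len(word)+1):
--             states.append(word[:i])
--     states = list(set(states))
--     states.sort()
--     return states
-- ===== SOURCE B (Python) =====
-- def make_states(words):
--     # Sort the words once; then scan them in order, emitting for each word only
--     # the prefixes longer than its longest common prefix with the previous word.
--     # This yields the distinct prefixes directly in sorted order, with "" first,
--     # with no prefix set and no sort of the prefix collection.
--     out = [""]
--     prev = ""
--     for w in sorted(words):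
--         k = 0
--         while k < len(prev) and k < len(w) and prev[k] == w[k]:
--             k += 1
--         for i in range(k + 1, len(w) + 1):
--             out.append(w[:i])
--         prev = w
--     return out
-- ===== Notes on version B (the rewrite author's own statement) =====
-- stated objective: alternative
-- what changed: Instead of materialising every prefix of every word, deduplicating with set() and sorting the whole prefix list, B sorts the words once and scans them in order, emitting for each word only the prefixes longer than its longest common prefix with the previous word; this yields the distinct prefixes directly in sorted order without a prefix set or a second sort.
import Mathlib
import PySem

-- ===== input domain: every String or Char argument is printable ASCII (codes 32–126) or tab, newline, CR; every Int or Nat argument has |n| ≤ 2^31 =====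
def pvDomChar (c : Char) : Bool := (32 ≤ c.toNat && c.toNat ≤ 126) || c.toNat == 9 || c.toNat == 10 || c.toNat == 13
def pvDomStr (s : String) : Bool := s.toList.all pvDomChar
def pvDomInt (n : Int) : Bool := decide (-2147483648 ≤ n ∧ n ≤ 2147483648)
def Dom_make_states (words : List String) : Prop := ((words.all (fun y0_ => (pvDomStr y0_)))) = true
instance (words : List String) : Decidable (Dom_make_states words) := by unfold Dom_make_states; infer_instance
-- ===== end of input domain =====

-- ===== PORT A =====
-- A collects every prefix of every word into a list, dedups it with set(), and sorts.
def make_states (words : List String) : List String :=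
  PySem.List.sorted
    (PySem.Set.ofList
      (words.foldl
        (fun states word =>
          (PySem.List.pyRange 1 ((PySem.Str.len word : Int) + 1) 1).foldl
            (fun states i => states ++ [PySem.Str.slice word none (some i)]) states)
        [""]))
    (fun x => x) false

-- ===== PORT B =====
-- hand port of Source B's while loop computing the longest-common-prefix length (exact)
def pvLcpLen : List Char → List Char → Nat
  | a :: as, b :: bs => if a = b then pvLcpLen as bs + 1 else 0
  | _, _ => 0

-- B: sort the words once, scan them in order and emit, per word, only the prefixes
-- longer than the common prefix with the previous word: the distinct prefixes
-- appear directly in sorted order, with no prefix set and no second sort.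
def make_states_alt (words : List String) : List String :=
  ((PySem.List.sorted words (fun x => x) false).foldl
    (fun (st : List String × String) w =>
      ((PySem.List.pyRange ((pvLcpLen st.2.toList w.toList : Int) + 1)
          ((PySem.Str.len w : Int) + 1) 1).foldl
        (fun out i => out ++ [PySem.Str.slice w none (some i)]) st.1,
       w))
    ([""], "")).1

-- ===== PRECONDITION & SPEC =====
def Spec_make_states (words : List String) (out : List String) : Prop := out = make_states_alt words
instance (words : List String) (out : List String) : Decidable (Spec_make_states words out) := by unfold Spec_make_states; infer_instance

-- ===== CLAIM (what is proved, stated in full; the proofs are below) =====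
def Claim_equal_make_states : Prop := ∀ (words : List String), Dom_make_states words → Spec_make_states words (make_states words)


-- ===== LEMMAS AND PROOFS =====

-- the block of prefixes of w of lengths k+1 .. |w|, as strings
def pvPrefs (w : List Char) (k : Nat) : List String :=
  (List.range' (k + 1) (w.length - k)).map (fun n => String.ofList (w.take n))

lemma pvSliceTake (w : String) (n : Nat) :
    PySem.Str.slice w none (some (n : Int)) = String.ofList (w.toList.take n) := by
  have h : (PySem.Str.slice w none (some (n : Int))).toList = w.toList.take n := by
    simp [PySem.Str.toList_slice, PySem.Chars.slice_eq_listSlice, PySem.List.slice_to_natCast]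
  have h2 := congrArg String.ofList h
  rwa [String.ofList_toList] at h2

lemma pvMapPyRange (w : String) : ∀ (d a : Nat),
    (PySem.List.pyRange (a : Int) (((a + d : Nat)) : Int) 1).map
        (fun i => PySem.Str.slice w none (some i))
      = (List.range' a d).map (fun n => String.ofList (w.toList.take n)) := by
  intro d
  induction d with
  | zero =>
    intro a
    rw [PySem.List.pyRange_one_eq_nil (by exact_mod_cast Nat.le_refl (a + 0))]
    simp
  | succ d ih =>
    intro a
    rw [PySem.List.pyRange_one_cons (by exact_mod_cast Nat.lt_add_of_pos_right (Nat.succ_pos d))]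
    have hcast : ((a : Int) + 1) = (((a + 1 : Nat)) : Int) := by push_cast; ring
    have hcast2 : (((a + (d + 1) : Nat)) : Int) = ((((a + 1) + d : Nat)) : Int) := by
      push_cast; ring
    rw [List.map_cons, pvSliceTake, hcast, hcast2, ih (a + 1), List.range'_succ, List.map_cons]

lemma pvLcp_le_right : ∀ (a b : List Char), pvLcpLen a b ≤ b.length := by
  intro a
  induction a with
  | nil => intro b; cases b <;> simp [pvLcpLen]
  | cons x xs ih =>
    intro b
    cases b with
    | nil => simp [pvLcpLen]
    | cons y ys =>
      by_cases h : x = y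
      · simp only [pvLcpLen, if_pos h, List.length_cons]
        exact Nat.succ_le_succ (ih ys)
      · simp [pvLcpLen, h]

lemma pvLcp_take : ∀ (n : Nat) (a b : List Char), n ≤ pvLcpLen a b → a.take n = b.take n := by
  intro n
  induction n with
  | zero => intro a b _; simp
  | succ n ih =>
    intro a b h
    cases a with
    | nil => simp [pvLcpLen] at h
    | cons x xs =>
      cases b with
      | nil => simp [pvLcpLen] at h
      | cons y ys =>
        by_cases hxy : x = y
        · simp only [pvLcpLen, if_pos hxy] at h
          simp [hxy, List.take_succ_cons, ih xs ys (Nat.le_of_succ_le_succ h)]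
        · simp [pvLcpLen, hxy] at h

lemma pvLeNil (u : List Char) (h : u ≤ []) : u = [] := by
  cases u with
  | nil => rfl
  | cons a as => exact absurd (List.nil_lt_cons a as) (not_lt.mpr h)

lemma pvNilLe (l : List Char) : ([] : List Char) ≤ l := by
  cases l with
  | nil => exact le_refl _
  | cons a as => exact le_of_lt (List.nil_lt_cons a as)

lemma pvConsLe {a c : Char} {u w : List Char} (h : (a :: u) ≤ (c :: w)) :
    a < c ∨ (a = c ∧ u ≤ w) := by
  rcases lt_or_eq_of_le h with h | h
  · cases h with
    | cons h => exact Or.inr ⟨rfl, le_of_lt h⟩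
    | rel h => exact Or.inl h
  · injection h with h1 h2
    exact Or.inr ⟨h1, le_of_eq h2⟩

lemma pvLcp_mono : ∀ (u v w : List Char), u ≤ v → v ≤ w → pvLcpLen u w ≤ pvLcpLen v w := by
  intro u
  induction u with
  | nil => intro v w _ _; cases w <;> simp [pvLcpLen]
  | cons a u' ih =>
    intro v w huv hvw
    cases v with
    | nil => simp [pvLeNil _ huv] at *
    | cons b v' =>
      cases w with
      | nil => simp [pvLcpLen]
      | cons c w' =>
        by_cases hac : a = c
        · rcases pvConsLe huv with h1 | ⟨h1, h1'⟩ <;> rcases pvConsLe hvw with h2 | ⟨h2, h2'⟩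
          · have hlt : a < c := lt_trans h1 h2
            rw [hac] at hlt; exact absurd hlt (lt_irrefl c)
          · have hlt : a < c := lt_of_lt_of_le h1 (le_of_eq h2)
            rw [hac] at hlt; exact absurd hlt (lt_irrefl c)
          · have hbc : b = c := h1.symm.trans hac
            rw [hbc] at h2; exact absurd h2 (lt_irrefl c)
          · subst h1; subst hac
            simp only [pvLcpLen, if_true]
            have := ih v' w' h1' h2'
            omega
        · simp [pvLcpLen, hac]

lemma pvLtAppend (p r : List Char) (hr : r ≠ []) : p < p ++ r := by
  induction p with
  | nil =>
    cases r with
    | nil => exact absurd rfl hr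
    | cons c r' => simp
  | cons a p ih => exact List.Lex.cons ih

lemma pvPrefixLt {p t : List Char} (h : p <+: t) (hne : p ≠ t) : p < t := by
  obtain ⟨r, rfl⟩ := h
  apply pvLtAppend
  rintro rfl
  simp at hne

-- the key order fact: for sorted input, every prefix of an earlier word is
-- lexicographically below every prefix of w longer than lcp(u, w)
lemma pvKey : ∀ (w u p : List Char) (i : Nat), u ≤ w → p <+: u →
    pvLcpLen u w < i → i ≤ w.length → p < w.take i := by
  intro w
  induction w with
  | nil =>
    intro u p i _ _ hlcp hi
    simp only [List.length_nil] at hi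
    omega
  | cons c w' ih =>
    intro u p i hu hp hlcp hi
    cases p with
    | nil =>
      cases i with
      | zero => omega
      | succ j => simp
    | cons a p' =>
      cases u with
      | nil => simp at hp
      | cons b u' =>
        obtain ⟨rfl, hp'⟩ := List.cons_prefix_cons.mp hp
        rcases pvConsLe hu with hac | ⟨hac, hu'⟩
        · cases i with
          | zero => omega
          | succ j => exact List.Lex.rel hac
        · subst hac
          simp only [pvLcpLen, if_true] at hlcp
          cases i with
          | zero => omega
          | succ j =>
            simp only [List.take_succ_cons]
            have hlcp' : pvLcpLen u' w' < j := by omega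
            have hj : j ≤ w'.length := by
              simp only [List.length_cons] at hi; omega
            exact List.Lex.cons (ih u' p' j hu' hp' hlcp' hj)


-- B's fold step, in closed form
def pvStepB (st : List String × String) (w : String) : List String × String :=
  (st.1 ++ pvPrefs w.toList (pvLcpLen st.2.toList w.toList), w)

lemma pvStep_eq (st : List String × String) (w : String) :
    ((PySem.List.pyRange ((pvLcpLen st.2.toList w.toList : Int) + 1)
        ((PySem.Str.len w : Int) + 1) 1).foldl
      (fun out i => out ++ [PySem.Str.slice w none (some i)]) st.1,
     w) = pvStepB st w := by
  unfold pvStepB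
  rw [PySem.List.foldl_append_singleton_eq_map]
  have hk : pvLcpLen st.2.toList w.toList ≤ w.toList.length := pvLcp_le_right _ _
  have hc1 : ((pvLcpLen st.2.toList w.toList : Int) + 1)
      = (((pvLcpLen st.2.toList w.toList + 1 : Nat)) : Int) := by push_cast; ring
  have hc2 : ((PySem.Str.len w : Int) + 1)
      = ((((pvLcpLen st.2.toList w.toList + 1) + (w.toList.length - pvLcpLen st.2.toList w.toList) : Nat)) : Int) := by
    rw [PySem.Str.len_eq]; push_cast; omega
  rw [hc1, hc2, pvMapPyRange w (w.toList.length - pvLcpLen st.2.toList w.toList)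
    (pvLcpLen st.2.toList w.toList + 1)]
  rfl

lemma pvMapPyRangeA (w : String) :
    (PySem.List.pyRange 1 ((PySem.Str.len w : Int) + 1) 1).map
        (fun i => PySem.Str.slice w none (some i)) = pvPrefs w.toList 0 := by
  have h := pvMapPyRange w w.toList.length 1
  have hc : (((1 + w.toList.length : Nat)) : Int) = (PySem.Str.len w : Int) + 1 := by
    rw [PySem.Str.len_eq]; push_cast; ring
  rw [hc] at h
  have hc1 : (((1 : Nat)) : Int) = (1 : Int) := by norm_num
  rw [hc1] at h
  rw [h]
  simp [pvPrefs]

lemma pvAltFold (ws : List String) (st : List String × String) :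
    ws.foldl
      (fun (st : List String × String) w =>
        ((PySem.List.pyRange ((pvLcpLen st.2.toList w.toList : Int) + 1)
            ((PySem.Str.len w : Int) + 1) 1).foldl
          (fun out i => out ++ [PySem.Str.slice w none (some i)]) st.1,
         w)) st
      = ws.foldl pvStepB st := by
  refine PySem.List.foldl_congr_mem _ _ _ _ ?_
  intro acc x _
  exact pvStep_eq acc x

lemma pvMemPrefs (w : List Char) (k : Nat) (hk : k ≤ w.length) (x : String) :
    x ∈ pvPrefs w k ↔ ∃ n, k + 1 ≤ n ∧ n ≤ w.length ∧ x = String.ofList (w.take n) := by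
  simp only [pvPrefs, List.mem_map, List.mem_range'_1]
  constructor
  · rintro ⟨n, ⟨h1, h2⟩, rfl⟩
    exact ⟨n, h1, by omega, rfl⟩
  · rintro ⟨n, h1, h2, rfl⟩
    exact ⟨n, ⟨h1, by omega⟩, rfl⟩

lemma pvFoldB : ∀ (ws : List String) (out : List String) (prev : String),
    ws.Pairwise (· ≤ ·) →
    (∀ w ∈ ws, prev ≤ w) →
    (∀ p : List Char, p <+: prev.toList → String.ofList p ∈ out) →
    (∀ x ∈ out, ∃ u : String, u ≤ prev ∧ x.toList <+: u.toList) →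
    out.Pairwise (· < ·) →
    (ws.foldl pvStepB (out, prev)).1.Pairwise (· < ·) ∧
    (∀ x, x ∈ (ws.foldl pvStepB (out, prev)).1 ↔
      x ∈ out ∨ ∃ w ∈ ws, ∃ n, 1 ≤ n ∧ n ≤ w.toList.length ∧ x = String.ofList (w.toList.take n)) := by
  intro ws
  induction ws with
  | nil =>
    intro out prev _ _ _ _ hpw
    exact ⟨hpw, by simp⟩
  | cons w ws ih =>
    intro out prev hs hlo hprev hsub hpw
    have hprevw : prev ≤ w := hlo w (by simp)
    have hkle : pvLcpLen prev.toList w.toList ≤ w.toList.length := pvLcp_le_right _ _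
    -- every old element is below every newly emitted prefix
    have hcross : ∀ x ∈ out, ∀ y ∈ pvPrefs w.toList (pvLcpLen prev.toList w.toList), x < y := by
      intro x hx y hy
      obtain ⟨u, hup, hpre⟩ := hsub x hx
      obtain ⟨n, hn1, hn2, rfl⟩ := (pvMemPrefs _ _ hkle y).mp hy
      have h1 : u.toList ≤ w.toList :=
        String.le_iff_toList_le.mp (le_trans hup hprevw)
      have h2 : pvLcpLen u.toList w.toList < n := by
        have := pvLcp_mono u.toList prev.toList w.toList
          (String.le_iff_toList_le.mp hup) (String.le_iff_toList_le.mp hprevw)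
        omega
      have h3 := pvKey w.toList u.toList x.toList n h1 hpre h2 hn2
      rw [String.lt_iff_toList_lt, String.toList_ofList]
      exact h3
    -- the newly emitted block is strictly increasing
    have hblock : (pvPrefs w.toList (pvLcpLen prev.toList w.toList)).Pairwise (· < ·) := by
      rw [pvPrefs, List.pairwise_map]
      refine List.Pairwise.imp_of_mem ?_ (List.pairwise_lt_range' 1)
      intro a b ha hb hab
      have hb' : b ≤ w.toList.length := by
        have := List.mem_range'_1.mp hb; omega
      have ha' : a ≤ w.toList.length := le_of_lt (lt_of_lt_of_le hab hb')
      rw [String.lt_iff_toList_lt, String.toList_ofList, String.toList_ofList]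
      refine pvPrefixLt (List.take_prefix_take_left (le_of_lt hab)) ?_
      intro heq
      have := congrArg List.length heq
      simp only [List.length_take] at this
      omega
    have hpw' : (out ++ pvPrefs w.toList (pvLcpLen prev.toList w.toList)).Pairwise (· < ·) :=
      List.pairwise_append.mpr ⟨hpw, hblock, hcross⟩
    -- every prefix of w is now present
    have hprev' : ∀ p : List Char, p <+: w.toList →
        String.ofList p ∈ out ++ pvPrefs w.toList (pvLcpLen prev.toList w.toList) := by
      intro p hp
      have hpeq : p = w.toList.take p.length := List.prefix_iff_eq_take.mp hp
      by_cases hc : p.length ≤ pvLcpLen prev.toList w.toList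
      · refine List.mem_append_left _ (hprev p ?_)
        have h1 : prev.toList.take p.length = w.toList.take p.length :=
          pvLcp_take p.length prev.toList w.toList hc
        rw [hpeq, ← h1]
        exact List.take_prefix _ _
      · refine List.mem_append_right _ ((pvMemPrefs _ _ hkle _).mpr ?_)
        exact ⟨p.length, by omega, hp.length_le, by rw [← hpeq]⟩
    -- every element is a prefix of some word ≤ w
    have hsub' : ∀ x ∈ out ++ pvPrefs w.toList (pvLcpLen prev.toList w.toList),
        ∃ u : String, u ≤ w ∧ x.toList <+: u.toList := by
      intro x hx
      rcases List.mem_append.mp hx with hx | hx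
      · obtain ⟨u, hup, hpre⟩ := hsub x hx
        exact ⟨u, le_trans hup hprevw, hpre⟩
      · obtain ⟨n, _, _, rfl⟩ := (pvMemPrefs _ _ hkle x).mp hx
        exact ⟨w, le_refl w, by rw [String.toList_ofList]; exact List.take_prefix _ _⟩
    have hcons := List.pairwise_cons.mp hs
    have hmain := ih (out ++ pvPrefs w.toList (pvLcpLen prev.toList w.toList)) w
      hcons.2 hcons.1 hprev' hsub' hpw'
    have hstep : (w :: ws).foldl pvStepB (out, prev)
        = ws.foldl pvStepB (out ++ pvPrefs w.toList (pvLcpLen prev.toList w.toList), w) := rfl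
    rw [hstep]
    refine ⟨hmain.1, fun x => ?_⟩
    rw [hmain.2 x]
    constructor
    · rintro (hx | ⟨v, hv, n, h1, h2, rfl⟩)
      · rcases List.mem_append.mp hx with hx | hx
        · exact Or.inl hx
        · obtain ⟨n, hn1, hn2, rfl⟩ := (pvMemPrefs _ _ hkle x).mp hx
          exact Or.inr ⟨w, by simp, n, by omega, hn2, rfl⟩
      · exact Or.inr ⟨v, by simp [hv], n, h1, h2, rfl⟩
    · rintro (hx | ⟨v, hv, n, h1, h2, rfl⟩)
      · exact Or.inl (List.mem_append_left _ hx)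
      · rcases List.mem_cons.mp hv with rfl | hv
        · by_cases hc : n ≤ pvLcpLen prev.toList v.toList
          · refine Or.inl (List.mem_append_left _ (hprev (v.toList.take n) ?_) )
            have h1' : prev.toList.take n = v.toList.take n :=
              pvLcp_take n prev.toList v.toList hc
            rw [← h1']
            exact List.take_prefix _ _
          · refine Or.inl (List.mem_append_right _ ((pvMemPrefs _ _ hkle _).mpr ?_))
            exact ⟨n, by omega, h2, rfl⟩
        · exact Or.inr ⟨v, hv, n, h1, h2, rfl⟩

-- ===== VERDICT (by name: the statement is the Claim_ definition above) =====
theorem make_states_spec : Claim_equal_make_states := by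
  intro words _
  unfold Spec_make_states make_states make_states_alt
  -- B side: fold in closed form
  rw [pvAltFold]
  have hspair : (PySem.List.sorted words (fun x => x) false).Pairwise (· ≤ ·) := by
    simpa using PySem.List.sorted_pairwise words (fun x => x)
  obtain ⟨hpairB, hmemB⟩ := pvFoldB (PySem.List.sorted words (fun x => x) false) [""] ""
    hspair
    (fun w _ => String.le_iff_toList_le.mpr (by simpa using pvNilLe w.toList))
    (by
      intro p hp
      have : p = [] := List.prefix_nil.mp (by simpa using hp)
      simp [this, String.ofList_nil])
    (by
      intro x hx
      have hx' : x = "" := by simpa using hx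
      exact ⟨"", le_refl _, by simp [hx']⟩)
    (by simp)
  -- A side: the collected prefix list in closed form
  have hA : words.foldl
      (fun states word =>
        (PySem.List.pyRange 1 ((PySem.Str.len word : Int) + 1) 1).foldl
          (fun states i => states ++ [PySem.Str.slice word none (some i)]) states)
      [""]
      = [""] ++ words.flatMap (fun w => pvPrefs w.toList 0) := by
    have hstep : ∀ (acc : List String) (word : String), word ∈ words →
        (PySem.List.pyRange 1 ((PySem.Str.len word : Int) + 1) 1).foldl
          (fun states i => states ++ [PySem.Str.slice word none (some i)]) acc
        = acc ++ pvPrefs word.toList 0 := by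
      intro acc word _
      rw [PySem.List.foldl_append_singleton_eq_map, pvMapPyRangeA]
    have h1 : words.foldl
        (fun states word =>
          (PySem.List.pyRange 1 ((PySem.Str.len word : Int) + 1) 1).foldl
            (fun states i => states ++ [PySem.Str.slice word none (some i)]) states)
        [""]
        = words.foldl (fun acc w => acc ++ pvPrefs w.toList 0) [""] :=
      PySem.List.foldl_congr_mem _ _ _ _ hstep
    rw [h1, PySem.List.foldl_append_eq_flatMap]
  rw [hA]
  -- both sides are the strictly sorted list of all distinct prefixes
  refine PySem.List.sorted_eq_of_perm_of_pairwise_lt _ _ (fun x => x) ?_ hpairB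
  refine (List.perm_ext_iff_of_nodup (hpairB.imp ne_of_lt) (PySem.Set.nodup_ofList _)).mpr ?_
  intro x
  rw [hmemB x, PySem.Set.mem_ofList]
  simp only [List.cons_append, List.nil_append, List.mem_cons, List.mem_flatMap,
    PySem.List.mem_sorted, List.not_mem_nil, or_false]
  constructor
  · rintro (hx | ⟨w, hw, n, h1, h2, rfl⟩)
    · exact Or.inl hx
    · refine Or.inr ⟨w, hw, ?_⟩
      exact (pvMemPrefs w.toList 0 (by omega) _).mpr ⟨n, by omega, h2, rfl⟩
  · rintro (hx | ⟨w, hw, hmem⟩)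
    · exact Or.inl hx
    · obtain ⟨n, h1, h2, rfl⟩ := (pvMemPrefs w.toList 0 (by omega) _).mp hmem
      exact Or.inr ⟨w, hw, n, h1, h2, rfl⟩
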